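-- pv_equiv track=rewrite | github.com/NxthingbutV0id/CTI-8-Microprocessor | software/assembler.py | parse_asciiz_operand
-- ===== SOURCE A (Python) =====
-- def parse_asciiz_operand(operand):
--     """
--     Parses a .asciiz operand string like '"Hello", " World"'
--     Returns a list of bytes including the trailing zero.
--     Supports escape sequences: \\r, \\n, \\t, \\", \\\\
--     """
--     if not operand:
--         return [0]
--
--     data = []
--     in_string = False
--     escape = False
--
--     for char in operand:
--         if in_string:
--             if escape:
--                 if char == 'r': data.append(0x0D)
--                 elif char == 'n': data.append(0x0A)
--                 elif char == 't': data.append(0x09)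
--                 elif char == '"': data.append(0x22)
--                 elif char == '\\': data.append(0x5C)
--                 else: data.append(ord(char)) # Unknown escape, just take char
--                 escape = False
--             elif char == '\\':
--                 escape = True
--             elif char == '"':
--                 in_string = False
--             else:
--                 data.append(ord(char))
--         else:
--             if char == '"':
--                 in_string = True
--
--     data.append(0) # Null terminator
--     return data
-- ===== SOURCE B (Python) =====
-- # Delimiter-jumping parser: instead of a per-character state machine, repeatedly
-- # locate the next delimiter (quote or backslash) with str.find and copy whole
-- # delimiter-free chunks in bulk.
-- _ESC = {'r': 0x0D, 'n': 0x0A, 't': 0x09, '"': 0x22, '\\': 0x5C}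
--
-- def parse_asciiz_operand(operand):
--     data = []
--     n = len(operand)
--     i = 0
--     while True:
--         q = operand.find('"', i)            # jump to the next string literal
--         if q == -1:
--             break
--         i = q + 1
--         while True:                          # copy one string literal chunk-wise
--             q = operand.find('"', i)
--             b = operand.find('\\', i)
--             if b == -1 or (q != -1 and q < b):
--                 if q == -1:                  # unterminated string: rest is content
--                     data += map(ord, operand[i:])
--                     data.append(0)
--                     return data
--                 data += map(ord, operand[i:q])
--                 i = q + 1
--                 break
--             data += map(ord, operand[i:b])
--             if b + 1 < n:
--                 nxt = operand[b + 1]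
--                 data.append(_ESC.get(nxt, ord(nxt)))
--                 i = b + 2
--             else:                            # trailing backslash: contributes nothing
--                 data.append(0)
--                 return data
--     data.append(0)
--     return data
-- ===== Notes on version B (the rewrite author's own statement) =====
-- stated objective: faster
-- what changed: Replaces A's per-character quote/escape state-machine loop with a delimiter-jumping parser: two nested loops locate the next quote or backslash delimiter with str.find and copy whole delimiter-free chunks in bulk, so no per-character Python-level state is maintained.
import Mathlib
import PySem

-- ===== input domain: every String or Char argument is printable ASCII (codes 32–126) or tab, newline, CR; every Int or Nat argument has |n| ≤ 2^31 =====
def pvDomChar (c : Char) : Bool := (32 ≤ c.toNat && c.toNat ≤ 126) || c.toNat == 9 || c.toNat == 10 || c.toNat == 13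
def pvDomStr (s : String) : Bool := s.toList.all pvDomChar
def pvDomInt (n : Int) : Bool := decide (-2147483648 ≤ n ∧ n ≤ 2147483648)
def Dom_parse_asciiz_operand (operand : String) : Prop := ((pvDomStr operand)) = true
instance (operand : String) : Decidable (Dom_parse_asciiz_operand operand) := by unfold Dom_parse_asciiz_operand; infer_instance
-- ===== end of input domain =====

-- B replaces A's per-character quote/escape state machine by a delimiter-jumping parser:
-- it repeatedly locates the next delimiter with str.find and copies whole delimiter-free
-- chunks in bulk (objective: faster by a constant factor, measured).

-- ===== PORT A =====
-- one step of A's for-loop: state = (data, in_string, escape)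
def pvStepA (st : List Int × Bool × Bool) (c : Char) : List Int × Bool × Bool :=
  match st with
  | (data, inStr, esc) =>
    if inStr then
      if esc then
        (data ++ [if c = 'r' then (0x0D : Int)
                  else if c = 'n' then 0x0A
                  else if c = 't' then 0x09
                  else if c = '"' then 0x22
                  else if c = '\\' then 0x5C
                  else (c.toNat : Int)], true, false)
      else if c = '\\' then (data, true, true)
      else if c = '"' then (data, false, false)
      else (data ++ [(c.toNat : Int)], true, false)
    else
      if c = '"' then (data, true, false) else (data, inStr, esc)

def parse_asciiz_operand (operand : String) : List Int :=
  if operand = "" then [0]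
  else (operand.toList.foldl pvStepA ([], false, false)).1 ++ [0]

-- ===== PORT B =====
-- the escape lookup dict of Source B
def pvEsc : PySem.Dict Char Int :=
  PySem.Dict.ofList [('r', 0x0D), ('n', 0x0A), ('t', 0x09), ('"', 0x22), ('\\', 0x5C)]

-- Source B's two nested while loops, as mutual recursion over the current index i.
-- The fuel argument only makes the loop total: the index strictly increases and stays
-- ≤ length, so fuel = length + 1 is never exhausted (the proofs below never reach 0).
mutual
-- outer loop: jump to the next string literal
def pvSkip : Nat → List Char → Nat → List Int
  | 0, _, _ => [0]
  | fuel+1, l, i =>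
    let q := PySem.Chars.findFrom l ['"'] (i : Int) none
    if q = -1 then [0]
    else pvCopy fuel l (q.toNat + 1)

-- inner loop: copy one string literal chunk-wise up to the next delimiter
def pvCopy : Nat → List Char → Nat → List Int
  | 0, _, _ => [0]
  | fuel+1, l, i =>
    let q := PySem.Chars.findFrom l ['"'] (i : Int) none
    let b := PySem.Chars.findFrom l ['\\'] (i : Int) none
    if b = -1 ∨ (q ≠ -1 ∧ q < b) then
      if q = -1 then
        (PySem.List.slice l (some (i : Int)) none).map (fun c => (c.toNat : Int)) ++ [0]
      else
        (PySem.List.slice l (some (i : Int)) (some q)).map (fun c => (c.toNat : Int)) ++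
          pvSkip fuel l (q.toNat + 1)
    else
      (PySem.List.slice l (some (i : Int)) (some b)).map (fun c => (c.toNat : Int)) ++
        (if b + 1 < (l.length : Int) then
          -- operand[b+1]: index in range since b + 1 < n was just checked
          (pvEsc.getD (l.getD (b.toNat + 1) ' ') (((l.getD (b.toNat + 1) ' ').toNat : Nat) : Int)) ::
            pvCopy fuel l (b.toNat + 2)
        else [0])
end

def parse_asciiz_operand_alt (operand : String) : List Int :=
  pvSkip (operand.toList.length + 1) operand.toList 0

-- ===== PRECONDITION & SPEC =====
def Spec_parse_asciiz_operand (operand : String) (out : List Int) : Prop := out = parse_asciiz_operand_alt operand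
instance (operand : String) (out : List Int) : Decidable (Spec_parse_asciiz_operand operand out) := by unfold Spec_parse_asciiz_operand; infer_instance

-- ===== CLAIM (what is proved, stated in full; the proofs are below) =====
def Claim_equal_parse_asciiz_operand : Prop := ∀ (operand : String), Dom_parse_asciiz_operand operand → Spec_parse_asciiz_operand operand (parse_asciiz_operand operand)

-- ===== LEMMAS AND PROOFS =====

-- reference recursion used only by the proofs: A's state machine written on the char list
def pvRef : List Char → Bool → List Int
  | [], _ => []
  | c :: rest, inStr =>
    if !inStr then pvRef rest (c = '"')
    else if c = '\\' then
      match rest with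
      | [] => []
      | nxt :: rest' => pvEsc.getD nxt (nxt.toNat : Int) :: pvRef rest' true
    else if c = '"' then pvRef rest false
    else (c.toNat : Int) :: pvRef rest true

lemma pvEsc_getD (c : Char) :
    pvEsc.getD c (c.toNat : Int) =
      (if c = 'r' then (0x0D : Int)
       else if c = 'n' then 0x0A
       else if c = 't' then 0x09
       else if c = '"' then 0x22
       else if c = '\\' then 0x5C
       else (c.toNat : Int)) := by
  have h : pvEsc = PySem.Dict.mk [('r', 13), ('n', 10), ('t', 9), ('"', 34), ('\\', 92)] := rfl
  simp only [h, PySem.Dict.getD, PySem.Dict.get?_mk_cons, beq_iff_eq]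
  split_ifs <;> simp_all [PySem.Dict.get?, eq_comm]

-- A's foldl, started in a non-escape state, produces exactly pvRef
lemma pv_main (l : List Char) (inStr : Bool) :
    ∀ data : List Int,
      (l.foldl pvStepA (data, inStr, false)).1 = data ++ pvRef l inStr := by
  fun_induction pvRef l inStr with
  | case1 b => intro data; simp
  | case2 c rest inStr hin ih =>
    intro data
    have h0 : inStr = false := by simpa using hin
    subst h0
    by_cases hc : c = '"' <;>
      · simp [List.foldl, pvStepA, hc]
        simpa [hc] using ih data
  | case3 inStr hin =>
    intro data
    have h0 : inStr = true := by simpa using hin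
    subst h0
    simp [List.foldl, pvStepA]
  | case4 inStr hin nxt rest' ih =>
    intro data
    have h0 : inStr = true := by simpa using hin
    subst h0
    simp [List.foldl, pvStepA, ih, pvEsc_getD]
  | case5 rest inStr hin hc ih =>
    intro data
    have h0 : inStr = true := by simpa using hin
    subst h0
    simp [List.foldl, pvStepA, ih]
  | case6 c rest inStr hin hb hq ih =>
    intro data
    have h0 : inStr = true := by simpa using hin
    subst h0
    simp [List.foldl, pvStepA, hb, hq, ih]

-- one-step unfoldings of the fueled loops (definitional)
lemma pvSkip_succ (fuel : Nat) (l : List Char) (i : Nat) :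
    pvSkip (fuel + 1) l i =
      (if PySem.Chars.findFrom l ['"'] (i : Int) none = -1 then [0]
       else pvCopy fuel l ((PySem.Chars.findFrom l ['"'] (i : Int) none).toNat + 1)) := rfl

lemma pvCopy_succ (fuel : Nat) (l : List Char) (i : Nat) :
    pvCopy (fuel + 1) l i =
      (if PySem.Chars.findFrom l ['\\'] (i : Int) none = -1 ∨
          (PySem.Chars.findFrom l ['"'] (i : Int) none ≠ -1 ∧
           PySem.Chars.findFrom l ['"'] (i : Int) none < PySem.Chars.findFrom l ['\\'] (i : Int) none) then
        if PySem.Chars.findFrom l ['"'] (i : Int) none = -1 then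
          (PySem.List.slice l (some (i : Int)) none).map (fun c => (c.toNat : Int)) ++ [0]
        else
          (PySem.List.slice l (some (i : Int)) (some (PySem.Chars.findFrom l ['"'] (i : Int) none))).map
              (fun c => (c.toNat : Int)) ++
            pvSkip fuel l ((PySem.Chars.findFrom l ['"'] (i : Int) none).toNat + 1)
      else
        (PySem.List.slice l (some (i : Int)) (some (PySem.Chars.findFrom l ['\\'] (i : Int) none))).map
            (fun c => (c.toNat : Int)) ++
          (if PySem.Chars.findFrom l ['\\'] (i : Int) none + 1 < (l.length : Int) then
            (pvEsc.getD (l.getD ((PySem.Chars.findFrom l ['\\'] (i : Int) none).toNat + 1) ' ')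
                (((l.getD ((PySem.Chars.findFrom l ['\\'] (i : Int) none).toNat + 1) ' ').toNat : Nat) : Int)) ::
              pvCopy fuel l ((PySem.Chars.findFrom l ['\\'] (i : Int) none).toNat + 2)
          else [0])) := rfl

-- find l [c]: absence is non-membership
lemma pvSingletonInfix (c : Char) (l : List Char) : [c] <:+: l ↔ c ∈ l := by
  constructor
  · intro h; exact h.mem (List.mem_singleton_self c)
  · intro h
    obtain ⟨s, t, rfl⟩ := List.append_of_mem h
    exact ⟨s, t, by simp⟩

lemma pvFindNeg (l : List Char) (c : Char) :
    PySem.Chars.find l [c] = -1 ↔ c ∉ l := by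
  rw [PySem.Chars.find_eq_neg_one_iff, pvSingletonInfix]

-- find l [c] ≠ -1: the result is the index of the FIRST occurrence of c
lemma pvFindPos (l : List Char) (c : Char) (h : PySem.Chars.find l [c] ≠ -1) :
    ∃ k : Nat, PySem.Chars.find l [c] = (k : Int) ∧ k < l.length ∧
      l.drop k = c :: l.drop (k + 1) ∧ c ∉ l.take k := by
  have h0 : 0 ≤ PySem.Chars.find l [c] := by
    have := PySem.Chars.neg_one_le_find l [c]; omega
  obtain ⟨hpre, hmin⟩ := PySem.Chars.find_spec (s := l) (sub := [c]) h0
  obtain ⟨t, ht⟩ := hpre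
  have ht' : l.drop (PySem.Chars.find l [c]).toNat = c :: t := by simpa using ht.symm
  have hlt : (PySem.Chars.find l [c]).toNat < l.length := by
    have hne : l.drop (PySem.Chars.find l [c]).toNat ≠ [] := by rw [ht']; simp
    have := List.drop_eq_nil_iff.not.mp hne
    omega
  refine ⟨(PySem.Chars.find l [c]).toNat, by omega, hlt, ?_, ?_⟩
  · rw [ht']
    congr 1
    have h2 : (l.drop (PySem.Chars.find l [c]).toNat).tail =
        l.drop ((PySem.Chars.find l [c]).toNat + 1) := List.tail_drop
    rw [ht'] at h2
    simpa using h2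
  · intro hc
    obtain ⟨j, hj, hget⟩ := List.mem_take_iff_getElem.mp hc
    have hjl : j < l.length := by omega
    apply hmin j (by omega)
    refine ⟨l.drop (j + 1), ?_⟩
    have := List.getElem_cons_drop (as := l) (i := j) hjl
    rw [hget] at this
    simpa using this

-- pvRef skips everything outside a string up to the next quote
lemma pvRef_skip (u t : List Char) (h : '"' ∉ u) :
    pvRef (u ++ t) false = pvRef t false := by
  induction u with
  | nil => rfl
  | cons c u ih =>
    have hc : c ≠ '"' := fun hc => h (by simp [hc])
    rw [List.cons_append, pvRef.eq_def]
    simp only [Bool.not_false, hc, decide_eq_false hc, reduceIte]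
    exact ih (fun hm => h (List.mem_cons_of_mem _ hm))

-- pvRef copies a delimiter-free chunk verbatim
lemma pvRef_copy (u t : List Char) (h : ∀ c ∈ u, c ≠ '"' ∧ c ≠ '\\') :
    pvRef (u ++ t) true = u.map (fun c => (c.toNat : Int)) ++ pvRef t true := by
  induction u with
  | nil => rfl
  | cons c u ih =>
    obtain ⟨hq, hb⟩ := h c (by simp)
    rw [List.cons_append, pvRef.eq_def]
    simp [hq, hb, ih (fun c hc => h c (by simp [hc]))]

-- splitting the suffix at the first occurrence found by find
lemma pvSplit (l : List Char) (i k : Nat) (c : Char)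
    (hd : (l.drop i).drop k = c :: (l.drop i).drop (k + 1)) :
    l.drop i = (l.drop i).take k ++ c :: l.drop (i + k + 1) := by
  conv_lhs => rw [← List.take_append_drop k (l.drop i)]
  rw [hd, List.drop_drop, show i + (k + 1) = i + k + 1 by omega]



-- small definitional unfoldings of pvRef
lemma pvRef_quote (v : List Char) : pvRef ('"' :: v) false = pvRef v true := by
  rw [pvRef.eq_def]; simp

lemma pvRef_close (v : List Char) : pvRef ('"' :: v) true = pvRef v false := by
  rw [pvRef.eq_def]; simp

lemma pvRef_esc (nxt : Char) (v : List Char) :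
    pvRef ('\\' :: nxt :: v) true = pvEsc.getD nxt (nxt.toNat : Int) :: pvRef v true := by
  rw [pvRef.eq_def]; simp

lemma pvRef_bs_nil : pvRef ['\\'] true = [] := by
  rw [pvRef.eq_def]; simp

-- the backslash-first branch of pvCopy (shared by the no-quote and quote-later cases)
lemma pv_copy_bslash (l : List Char) (i kb fuel : Nat)
    (hi : i ≤ l.length) (hf : l.length - i < fuel + 1)
    (hkb : PySem.Chars.find (l.drop i) ['\\'] = (kb : Int))
    (hltb : kb < (l.drop i).length)
    (hdropb : (l.drop i).drop kb = '\\' :: (l.drop i).drop (kb + 1))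
    (hmemb : '\\' ∉ (l.drop i).take kb)
    (hquote : '"' ∉ (l.drop i).take kb)
    (ih : ∀ (l : List Char) (i : Nat), i ≤ l.length → l.length - i < fuel →
      pvSkip fuel l i = pvRef (l.drop i) false ++ [0] ∧
      pvCopy fuel l i = pvRef (l.drop i) true ++ [0]) :
    ((PySem.List.slice l (some (i : Int)) (some ((i : Int) + (kb : Int)))).map
        (fun c => (c.toNat : Int)) ++
      (if (i : Int) + (kb : Int) + 1 < (l.length : Int) then
        (pvEsc.getD (l.getD (((i : Int) + (kb : Int)).toNat + 1) ' ')
            (((l.getD (((i : Int) + (kb : Int)).toNat + 1) ' ').toNat : Nat) : Int)) ::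
          pvCopy fuel l (((i : Int) + (kb : Int)).toNat + 2)
      else [0])) = pvRef (l.drop i) true ++ [0] := by
  have hlen : (l.drop i).length = l.length - i := by simp
  have hslice : PySem.List.slice l (some (i : Int)) (some ((i : Int) + (kb : Int))) =
      (l.drop i).take kb := by
    have h1 := PySem.List.slice_natCast (xs := l) (a := i) (b := i + kb)
    rw [show ((i + kb : Nat) : Int) = (i : Int) + (kb : Int) by push_cast; ring] at h1
    rw [h1]; congr 1; omega
  rw [hslice]
  have htn : ((i : Int) + (kb : Int)).toNat = i + kb := by omega
  by_cases hend : i + kb + 1 < l.length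
  · -- an escaped character follows the backslash
    rw [if_pos (by omega)]
    rw [htn]
    obtain ⟨nxt, tail', htail⟩ : ∃ nxt tail', l.drop (i + kb + 1) = nxt :: tail' :=
      List.exists_cons_of_ne_nil (by rw [ne_eq, List.drop_eq_nil_iff]; omega)
    have hget : l.getD (i + kb + 1) ' ' = nxt := by
      rw [List.getD_eq_getElem?_getD, ← List.head?_drop, htail]; rfl
    rw [hget]
    have htail' : tail' = l.drop (i + kb + 2) := by
      have h2 : (l.drop (i + kb + 1)).tail = l.drop (i + kb + 1 + 1) := List.tail_drop
      rw [htail] at h2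
      simpa [Nat.add_assoc] using h2
    rw [show i + kb + 2 = (i + kb + 1) + 1 by omega] at htail'
    have hcopy := (ih l (i + kb + 1 + 1) (by omega) (by omega)).2
    conv_rhs => rw [pvSplit l i kb '\\' hdropb, htail]
    rw [pvRef_copy _ _ (fun c hc => ⟨fun h => hquote (h ▸ hc), fun h => hmemb (h ▸ hc)⟩)]
    rw [pvRef_esc]
    rw [htail', show i + kb + 2 = i + kb + 1 + 1 by omega, hcopy]
    simp
  · -- the backslash is the last character: it contributes nothing
    rw [if_neg (by omega)]
    have hnil : l.drop (i + kb + 1) = [] := by rw [List.drop_eq_nil_iff]; omega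
    conv_rhs => rw [pvSplit l i kb '\\' hdropb, hnil]
    rw [pvRef_copy _ _ (fun c hc => ⟨fun h => hquote (h ▸ hc), fun h => hmemb (h ▸ hc)⟩)]
    rw [pvRef_bs_nil]
    simp

-- the fueled delimiter-jumping loops compute pvRef on the remaining suffix
lemma pv_fuel : ∀ (fuel : Nat) (l : List Char) (i : Nat), i ≤ l.length → l.length - i < fuel →
    pvSkip fuel l i = pvRef (l.drop i) false ++ [0] ∧
    pvCopy fuel l i = pvRef (l.drop i) true ++ [0] := by
  intro fuel
  induction fuel with
  | zero => intro l i hi hf; omega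
  | succ fuel ih =>
    intro l i hi hf
    constructor
    · -- pvSkip
      rw [pvSkip_succ, PySem.Chars.findFrom_natCast l ['"'] i hi]
      by_cases hq : PySem.Chars.find (l.drop i) ['"'] = -1
      · rw [if_pos (by simp [hq])]
        rw [show l.drop i = l.drop i ++ [] by simp, pvRef_skip (l.drop i) [] ((pvFindNeg _ _).mp hq)]
        rfl
      · obtain ⟨k, hk, hlt, hdrop, hmem⟩ := pvFindPos (l.drop i) '"' hq
        have hlen : (l.drop i).length = l.length - i := by simp
        simp only [hk]
        rw [if_neg (by omega : ¬ ((k : Int) = -1)),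
          if_neg (by omega : ¬ ((i : Int) + (k : Int) = -1))]
        have htn : ((i : Int) + (k : Int)).toNat = i + k := by omega
        rw [htn]
        rw [(ih l (i + k + 1) (by omega) (by omega)).2]
        rw [pvSplit l i k '"' hdrop, pvRef_skip _ _ hmem, pvRef_quote]
    · -- pvCopy
      rw [pvCopy_succ, PySem.Chars.findFrom_natCast l ['"'] i hi,
        PySem.Chars.findFrom_natCast l ['\\'] i hi]
      have hlen : (l.drop i).length = l.length - i := by simp
      by_cases hb : PySem.Chars.find (l.drop i) ['\\'] = -1
      · -- no backslash in the rest
        have hbm : '\\' ∉ l.drop i := (pvFindNeg _ _).mp hb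
        by_cases hq : PySem.Chars.find (l.drop i) ['"'] = -1
        · -- no quote either: the whole rest is content
          have hqm : '"' ∉ l.drop i := (pvFindNeg _ _).mp hq
          rw [if_pos (by simp [hb])]
          rw [if_pos (by simp [hq])]
          rw [PySem.List.slice_from_natCast]
          rw [show pvRef (l.drop i) true = pvRef (l.drop i ++ []) true by simp,
            pvRef_copy (l.drop i) [] (fun c hc => ⟨fun h => hqm (h ▸ hc), fun h => hbm (h ▸ hc)⟩)]
          rw [show pvRef ([] : List Char) true = [] from rfl]
          simp
        · -- closing quote, no backslash anywhere
          obtain ⟨k, hk, hlt, hdrop, hmem⟩ := pvFindPos (l.drop i) '"' hq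
          rw [if_pos (by simp [hb])]
          simp only [hk]
          rw [if_neg (by omega : ¬ ((k : Int) = -1)),
            if_neg (by omega : ¬ ((i : Int) + (k : Int) = -1))]
          have hslice : PySem.List.slice l (some (i : Int)) (some ((i : Int) + (k : Int))) =
              (l.drop i).take k := by
            have h1 := PySem.List.slice_natCast (xs := l) (a := i) (b := i + k)
            rw [show ((i + k : Nat) : Int) = (i : Int) + (k : Int) by push_cast; ring] at h1
            rw [h1]; congr 1; omega
          rw [hslice]
          have htn : ((i : Int) + (k : Int)).toNat = i + k := by omega
          rw [htn, (ih l (i + k + 1) (by omega) (by omega)).1]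
          conv_rhs => rw [pvSplit l i k '"' hdrop]
          rw [pvRef_copy _ _
            (fun c hc => ⟨fun h => hmem (h ▸ hc), fun h => hbm ((List.take_subset k _) (h ▸ hc))⟩)]
          rw [pvRef_close]
          simp
      · -- a backslash exists in the rest
        obtain ⟨kb, hkb, hltb, hdropb, hmemb⟩ := pvFindPos (l.drop i) '\\' hb
        by_cases hq : PySem.Chars.find (l.drop i) ['"'] = -1
        · -- backslash but no quote: the backslash branch runs
          have hqm : '"' ∉ l.drop i := (pvFindNeg _ _).mp hq
          rw [if_neg (by simp [hq, hkb]; omega)]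
          simp only [hkb]
          rw [if_neg (by omega : ¬ ((kb : Int) = -1))]
          exact pv_copy_bslash l i kb fuel hi hf hkb hltb hdropb hmemb
            (fun hc => hqm ((List.take_subset kb _) hc)) ih
        · obtain ⟨k, hk, hlt, hdrop, hmem⟩ := pvFindPos (l.drop i) '"' hq
          by_cases hqb : k < kb
          · -- quote strictly before the backslash: close the string
            rw [if_pos (by
              right
              simp only [hk, hkb]
              constructor
              · omega
              · push_cast; omega)]
            simp only [hk]
            rw [if_neg (by omega : ¬ ((k : Int) = -1)),
              if_neg (by omega : ¬ ((i : Int) + (k : Int) = -1))]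
            have hslice : PySem.List.slice l (some (i : Int)) (some ((i : Int) + (k : Int))) =
                (l.drop i).take k := by
              have h1 := PySem.List.slice_natCast (xs := l) (a := i) (b := i + k)
              rw [show ((i + k : Nat) : Int) = (i : Int) + (k : Int) by push_cast; ring] at h1
              rw [h1]; congr 1; omega
            rw [hslice]
            have htn : ((i : Int) + (k : Int)).toNat = i + k := by omega
            rw [htn, (ih l (i + k + 1) (by omega) (by omega)).1]
            have hmemb' : '\\' ∉ (l.drop i).take k := fun hc => hmemb (by
              have h2 : (l.drop i).take k = ((l.drop i).take kb).take k := by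
                rw [List.take_take, min_eq_left (Nat.le_of_lt hqb)]
              exact (List.take_subset _ _) (h2 ▸ hc))
            conv_rhs => rw [pvSplit l i k '"' hdrop]
            rw [pvRef_copy _ _
              (fun c hc => ⟨fun h => hmem (h ▸ hc), fun h => hmemb' (h ▸ hc)⟩)]
            rw [pvRef_close]
            simp
          · -- the backslash comes first (kb < k: they differ since the chars differ)
            have hne : kb ≠ k := by
              intro hkeq
              rw [hkeq, hdrop] at hdropb
              simp at hdropb
            have hkbk : kb < k := by omega
            rw [if_neg (by
              simp only [hk, hkb]
              push Not
              refine ⟨by omega, fun _ => by push_cast; omega⟩)]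
            simp only [hkb]
            rw [if_neg (by omega : ¬ ((kb : Int) = -1))]
            have hquote : '"' ∉ (l.drop i).take kb := fun hc => hmem (by
              have h2 : (l.drop i).take kb = ((l.drop i).take k).take kb := by
                rw [List.take_take, min_eq_left (Nat.le_of_lt hkbk)]
              exact (List.take_subset _ _) (h2 ▸ hc))
            exact pv_copy_bslash l i kb fuel hi hf hkb hltb hdropb hmemb hquote ih

-- ===== VERDICT (by name: the statement is the Claim_ definition above) =====
theorem parse_asciiz_operand_spec : Claim_equal_parse_asciiz_operand := by
  intro operand _
  unfold Spec_parse_asciiz_operand parse_asciiz_operand parse_asciiz_operand_alt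
  rw [(pv_fuel (operand.toList.length + 1) operand.toList 0 (by omega) (by omega)).1]
  by_cases h : operand = ""
  · subst h; rfl
  · simp only [h, reduceIte]
    rw [pv_main operand.toList false []]
    simp
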